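-- pv_equiv track=rewrite | github.com/melodist/CodingPractice | src/KAKAO/2020_BLIND_CheckOuterwall.py | select_delete_edge
-- ===== SOURCE A (Python) =====
-- from itertools import product
--
-- def select_delete_edge(num_delete, edge_list):
--     """ 지정된 edge를 list에서 제거함
--     bit-mask를 이용하여 num_delete 개의 edge가 제거된 list를 원소로 갖는 list 획득
--     """
--     # Make bit-mask
--     masks = list(reversed(list(product((0, 1), repeat=len(edge_list)))))
--     # Select bit-mask meets the condition
--     masks = [mask for mask in masks if mask.count(0)==num_delete]
--
--     # make edge list to visit
--     modified_edge_list = []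
--     for mask in masks:
--         modified_edge = []
--         for single_edge, single_mask in zip(edge_list,mask):
--             if single_edge * single_mask != tuple():
--                 modified_edge.append(single_edge * single_mask)
--         # returns true if modified_edge has values
--         if modified_edge:
--             modified_edge_list.append(modified_edge)
--
--     return modified_edge_list
-- ===== SOURCE B (Python) =====
-- from itertools import combinations
--
-- def select_delete_edge(num_delete, edge_list):
--     """Directly enumerate the C(n, num_delete) deletion-position sets instead of
--     filtering all 2^n bit-masks; kept rows list the surviving non-empty edges."""
--     n = len(edge_list)
--     if num_delete < 0 or num_delete > n:
--         return []
--     result = []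
--     for zeros in reversed(list(combinations(range(n), num_delete))):
--         row = [e for i, e in enumerate(edge_list) if i not in zeros and len(e) > 0]
--         if row:
--             result.append(row)
--     return result
-- ===== Notes on version B (the rewrite author's own statement) =====
-- stated objective: faster
-- what changed: B enumerates only the C(n,k) deletion-position subsets with itertools.combinations (reversed to match A's mask order) instead of generating and filtering all 2^n bit-masks.
import Mathlib
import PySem

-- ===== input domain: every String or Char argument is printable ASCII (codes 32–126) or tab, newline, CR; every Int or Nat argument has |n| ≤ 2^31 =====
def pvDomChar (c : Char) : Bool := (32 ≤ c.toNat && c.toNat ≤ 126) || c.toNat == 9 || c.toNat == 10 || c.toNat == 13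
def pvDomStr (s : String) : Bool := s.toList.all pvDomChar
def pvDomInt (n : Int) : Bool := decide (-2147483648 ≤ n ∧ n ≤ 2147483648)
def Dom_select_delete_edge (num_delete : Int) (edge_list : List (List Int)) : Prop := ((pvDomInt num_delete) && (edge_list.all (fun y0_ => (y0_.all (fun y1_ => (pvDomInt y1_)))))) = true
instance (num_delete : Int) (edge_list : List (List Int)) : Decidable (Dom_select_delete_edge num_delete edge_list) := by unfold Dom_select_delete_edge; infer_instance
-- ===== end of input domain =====

-- B enumerates only the C(n,k) deletion-position subsets (combinations, reversed) instead of filtering all 2^n bit-masks; measurably faster (asymptotic).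


-- ===== PORT A =====
-- product((0, 1), repeat=n), in itertools' lexicographic order (first coordinate slowest)
def pyProduct01 : Nat → List (List Int)
  | 0 => [[]]
  | n + 1 => ([0, 1] : List Int).flatMap (fun b => (pyProduct01 n).map (fun m => b :: m))

-- Python list repetition e * m (empty for m <= 0)
def pyListMulInt (e : List Int) (m : Int) : List Int := (List.replicate m.toNat e).flatten

def select_delete_edge (num_delete : Int) (edge_list : List (List Int)) : List (List (List Int)) :=
  let masks := (pyProduct01 edge_list.length).reverse
  let masks := masks.filter (fun mask => ((PySem.List.count mask (0 : Int) : Int) == num_delete))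
  masks.foldl (fun acc mask =>
    let modified := (edge_list.zip mask).foldl (fun me p =>
      -- `single_edge * single_mask != tuple()`: the repeated edge is kept iff it is non-empty
      if pyListMulInt p.1 p.2 ≠ [] then me ++ [pyListMulInt p.1 p.2] else me) ([] : List (List Int))
    if modified ≠ [] then acc ++ [modified] else acc) []

-- ===== PORT B =====
-- itertools.combinations(range(n), k), as index lists in lexicographic order
def combosB : Nat → List Int → List (List Int)
  | 0, _ => [[]]
  | _ + 1, [] => []
  | k + 1, x :: xs => (combosB k xs).map (fun c => x :: c) ++ combosB (k + 1) xs

def select_delete_edge_alt (num_delete : Int) (edge_list : List (List Int)) : List (List (List Int)) :=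
  let n := edge_list.length
  if num_delete < 0 ∨ num_delete > (n : Int) then []
  else
    ((combosB num_delete.toNat (PySem.List.pyRange 0 (n : Int) 1)).reverse).foldl (fun result zeros =>
      let row := ((PySem.List.enumerate edge_list 0).filter (fun p =>
        (!zeros.contains p.1) && decide (0 < p.2.length))).map (fun p => p.2)
      if row ≠ [] then result ++ [row] else result) []

-- ===== PRECONDITION & SPEC =====
def Spec_select_delete_edge (num_delete : Int) (edge_list : List (List Int)) (out : List (List (List Int))) : Prop := out = select_delete_edge_alt num_delete edge_list
instance (num_delete : Int) (edge_list : List (List Int)) (out : List (List (List Int))) : Decidable (Spec_select_delete_edge num_delete edge_list out) := by unfold Spec_select_delete_edge; infer_instance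

-- ===== CLAIM (what is proved, stated in full; the proofs are below) =====
def Claim_equal_select_delete_edge : Prop := ∀ (num_delete : Int) (edge_list : List (List Int)), Dom_select_delete_edge num_delete edge_list → Spec_select_delete_edge num_delete edge_list (select_delete_edge num_delete edge_list)

-- ===== LEMMAS AND PROOFS =====

-- the 0/1 mask whose zeros sit exactly at the positions in `zeros`
def maskOfP (l zeros : List Int) : List Int := l.map (fun i => if zeros.contains i then 0 else 1)

theorem mem_combosB_subset (k : Nat) (xs : List Int) (c : List Int) (hc : c ∈ combosB k xs) :
    ∀ i ∈ c, i ∈ xs := by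
  induction xs generalizing k c with
  | nil =>
    cases k with
    | zero => simp [combosB] at hc; simp [hc]
    | succ k => simp [combosB] at hc
  | cons x xs ih =>
    cases k with
    | zero => simp [combosB] at hc; simp [hc]
    | succ k =>
      simp only [combosB, List.mem_append, List.mem_map] at hc
      rcases hc with ⟨c', hc', rfl⟩ | hc
      · intro i hi
        rcases List.mem_cons.mp hi with rfl | hi
        · exact List.mem_cons_self
        · exact List.mem_cons_of_mem _ (ih k c' hc' i hi)
      · intro i hi
        exact List.mem_cons_of_mem _ (ih (k + 1) c hc i hi)

theorem combosB_eq_nil (k : Nat) (xs : List Int) (h : xs.length < k) : combosB k xs = [] := by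
  induction xs generalizing k with
  | nil =>
    cases k with
    | zero => simp at h
    | succ k => simp [combosB]
  | cons x xs ih =>
    cases k with
    | zero => simp at h
    | succ k =>
      simp only [List.length_cons, Nat.add_lt_add_iff_right] at h
      simp [combosB, ih k h, ih (k + 1) (Nat.lt_succ_of_lt h)]

theorem filter_product (l : List Int) (hl : l.Nodup) (k : Nat) :
    (pyProduct01 l.length).filter (fun m => (List.count (0 : Int) m == k)) =
      (combosB k l).map (maskOfP l) := by
  induction l generalizing k with
  | nil =>
    cases k with
    | zero => simp [pyProduct01, combosB, maskOfP]
    | succ k => simp [pyProduct01, combosB]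
  | cons x xs ih =>
    rcases List.nodup_cons.mp hl with ⟨hx, hnd⟩
    have hlen : (x :: xs).length = xs.length + 1 := rfl
    rw [hlen]
    have hprod : pyProduct01 (xs.length + 1) =
        (pyProduct01 xs.length).map (fun m => (0 : Int) :: m) ++
          (pyProduct01 xs.length).map (fun m => (1 : Int) :: m) := by
      simp [pyProduct01, List.flatMap]
    rw [hprod, List.filter_append, List.filter_map, List.filter_map]
    cases k with
    | zero =>
      have h1 : (pyProduct01 xs.length).filter
          ((fun m => (List.count (0 : Int) m == (0 : Nat))) ∘ (fun m => (0 : Int) :: m)) = [] := by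
        apply List.filter_eq_nil_iff.mpr
        intro m _
        simp
      have h2 : (pyProduct01 xs.length).filter
          ((fun m => (List.count (0 : Int) m == (0 : Nat))) ∘ (fun m => (1 : Int) :: m)) =
          (pyProduct01 xs.length).filter (fun m => (List.count (0 : Int) m == (0 : Nat))) := by
        apply List.filter_congr
        intro m _
        simp
      rw [h1, h2, ih hnd 0]
      simp [combosB, maskOfP]
    | succ k =>
      have h1 : (pyProduct01 xs.length).filter
          ((fun m => (List.count (0 : Int) m == (k + 1 : Nat))) ∘ (fun m => (0 : Int) :: m)) =
          (pyProduct01 xs.length).filter (fun m => (List.count (0 : Int) m == (k : Nat))) := by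
        apply List.filter_congr
        intro m _
        simp
      have h2 : (pyProduct01 xs.length).filter
          ((fun m => (List.count (0 : Int) m == (k + 1 : Nat))) ∘ (fun m => (1 : Int) :: m)) =
          (pyProduct01 xs.length).filter (fun m => (List.count (0 : Int) m == (k + 1 : Nat))) := by
        apply List.filter_congr
        intro m _
        simp
      rw [h1, h2, ih hnd k, ih hnd (k + 1)]
      simp only [combosB, List.map_append, List.map_map]
      congr 1
      · apply List.map_congr_left
        intro c hc
        have hsub := mem_combosB_subset k xs c hc
        simp only [Function.comp, maskOfP, List.map_cons, List.contains_cons, BEq.rfl,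
          Bool.true_or, if_true]
        congr 1
        apply List.map_congr_left
        intro i hi
        have hix : (i == x) = false := beq_eq_false_iff_ne.mpr (fun h => hx (h ▸ hi))
        simp [hix]
      · apply List.map_congr_left
        intro c hc
        have hsub := mem_combosB_subset (k + 1) xs c hc
        have hxc : x ∉ c := fun hm => hx (hsub x hm)
        simp [maskOfP, Function.comp, hxc]

theorem rowEq (el : List (List Int)) (zeros : List Int) (s : Int) :
    ((el.zip (maskOfP (PySem.List.pyRange s (s + el.length) 1) zeros)).filter
        (fun p => decide (pyListMulInt p.1 p.2 ≠ []))).map (fun p => pyListMulInt p.1 p.2) =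
      ((PySem.List.enumerate el s).filter (fun p =>
        (!zeros.contains p.1) && decide (0 < p.2.length))).map (fun p => p.2) := by
  induction el generalizing s with
  | nil =>
    simp
  | cons e el ih =>
    have hcons : PySem.List.pyRange s (s + ((e :: el).length : Int)) 1 =
        s :: PySem.List.pyRange (s + 1) (s + ((e :: el).length : Int)) 1 := by
      apply PySem.List.pyRange_one_cons
      have : (0:Int) < ((e :: el).length : Int) := by exact_mod_cast Nat.succ_pos el.length
      omega
    have hend : s + ((e :: el).length : Int) = (s + 1) + (el.length : Int) := by
      simp only [List.length_cons]
      push_cast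
      omega
    rw [hcons, hend]
    simp only [maskOfP, List.map_cons, List.zip_cons_cons, PySem.List.enumerate_cons,
      List.filter_cons]
    by_cases hc : s ∈ zeros
    · have hb : zeros.contains s = true := by simpa using hc
      simpa [hb, hc, pyListMulInt, maskOfP] using ih (s + 1)
    · have hb : zeros.contains s = false := by simpa using hc
      by_cases he : e = []
      · subst he
        simpa [hb, hc, pyListMulInt, maskOfP] using ih (s + 1)
      · have hlen0 : 0 < e.length := List.length_pos_iff.mpr he
        simpa [hb, hc, he, pyListMulInt, hlen0, maskOfP] using ih (s + 1)

-- ===== VERDICT (by name: the statement is the Claim_ definition above) =====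
theorem count_cast_beq (c : Nat) (k : Nat) : (((c : Int)) == ((k : Int))) = (c == k) := by
  by_cases h : c = k
  · simp [h]
  · have h' : (c : Int) ≠ (k : Int) := by exact_mod_cast h
    simp [h, h']

theorem select_delete_edge_spec : Claim_equal_select_delete_edge := by
  intro num_delete el _
  simp only [Spec_select_delete_edge, select_delete_edge, select_delete_edge_alt]
  by_cases hneg : num_delete < 0
  · have hfilter : ((pyProduct01 el.length).reverse).filter
        (fun mask => ((PySem.List.count mask (0 : Int) : Int) == num_delete)) = [] := by
      apply List.filter_eq_nil_iff.mpr
      intro mask _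
      simp only [beq_iff_eq]
      intro h
      omega
    simp only [hfilter, List.foldl_nil]
    simp [hneg]
  · have hnn : 0 ≤ num_delete := not_lt.mp hneg
    have hk : (num_delete.toNat : Int) = num_delete := Int.toNat_of_nonneg hnn
    have hpred : (fun mask => ((PySem.List.count mask (0 : Int) : Int) == num_delete)) =
        (fun m => (List.count (0 : Int) m == num_delete.toNat)) := by
      funext m
      rw [PySem.List.count_eq]
      conv_lhs => rw [← hk]
      rw [count_cast_beq]
    have hnd : (PySem.List.pyRange 0 (el.length : Int) 1).Nodup := PySem.List.nodup_pyRange_one 0 (el.length : Int)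
    have hlen : (PySem.List.pyRange 0 (el.length : Int) 1).length = el.length := by
      simp [PySem.List.length_pyRange_one]
    have hfp := filter_product (PySem.List.pyRange 0 (el.length : Int) 1) hnd num_delete.toNat
    rw [hlen] at hfp
    by_cases hgt : (el.length : Int) < num_delete
    · have hnil : combosB num_delete.toNat (PySem.List.pyRange 0 (el.length : Int) 1) = [] := by
        apply combosB_eq_nil
        rw [hlen]
        omega
      rw [List.filter_reverse, hpred, hfp, hnil]
      simp [hgt]
    · have hguard : ¬(num_delete < 0 ∨ (el.length : Int) < num_delete) := by omega
      rw [List.filter_reverse, hpred, hfp, ← List.map_reverse, List.foldl_map, if_neg hguard]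
      congr 1
      funext acc zeros
      have hm : (el.zip (maskOfP (PySem.List.pyRange 0 (el.length : Int) 1) zeros)).foldl
          (fun me p => if pyListMulInt p.1 p.2 ≠ [] then me ++ [pyListMulInt p.1 p.2] else me)
          ([] : List (List Int)) =
          ((PySem.List.enumerate el 0).filter (fun p =>
            (!zeros.contains p.1) && decide (0 < p.2.length))).map (fun p => p.2) := by
        rw [PySem.List.foldl_append_ite]
        simpa using rowEq el zeros 0
      simp only [hm]
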